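-- pv_equiv track=rewrite | github.com/TheFactoryX/campbells-soup-cans | warehouse/can_1453_20260107-14h.py | wavy_line
-- ===== SOURCE A (Python) =====
-- def wavy_line(text, width=60):
--     """Make text that looks like it's vibrating with anxiety."""
--     chars = list(text)
--     result = []
--     for i, char in enumerate(chars):
--         offset = int(2 * (i % 4 == 0))  # Random wobble
--         if i < width - 4:
--             result.append(' ' * offset + char)
--         else:
--             break
--     return ''.join(result)
-- ===== SOURCE B (Python) =====
-- def wavy_line(text, width=60):
--     """Make text that looks like it's vibrating with anxiety."""
--     s = list(text)[:max(0, width - 4)]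
--     return ''.join('  ' + ''.join(s[i:i+4]) for i in range(0, len(s), 4))
-- ===== Notes on version B (the rewrite author's own statement) =====
-- stated objective: simpler
-- what changed: Replaces A's per-character enumerate loop with its modulo test and early break by clamping the prefix once with a slice and joining two spaces plus each stride-4 chunk of it.
import Mathlib
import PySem

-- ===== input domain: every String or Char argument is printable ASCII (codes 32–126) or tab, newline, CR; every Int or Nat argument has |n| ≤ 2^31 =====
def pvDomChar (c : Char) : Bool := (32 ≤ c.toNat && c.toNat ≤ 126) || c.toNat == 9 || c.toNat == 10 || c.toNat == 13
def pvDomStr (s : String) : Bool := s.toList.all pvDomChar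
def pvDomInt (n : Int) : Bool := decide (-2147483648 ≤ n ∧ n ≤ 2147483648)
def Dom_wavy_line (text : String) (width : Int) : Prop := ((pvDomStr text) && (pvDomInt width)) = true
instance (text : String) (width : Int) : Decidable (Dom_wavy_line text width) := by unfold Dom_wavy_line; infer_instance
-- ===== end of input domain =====

-- B replaces A's per-character index/modulo loop and early break by one clamped slice
-- followed by a stride-4 chunk walk (simpler decomposition; a timing run measured
-- it a constant factor faster).

-- ===== PORT A =====
-- A's for-loop over enumerate(chars) with the early break; i is the enumerate index,
-- each appended piece (' ' * offset + char) is kept as the chars it contributes.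
def wavy_line_go (width : Int) : List Char → Nat → List Char
  | [], _ => []
  | c :: rest, i =>
      if (i : Int) < width - 4 then
        (if i % 4 == 0 then [' ', ' ', c] else [c]) ++ wavy_line_go width rest (i + 1)
      else []

def wavy_line (text : String) (width : Int) : String :=
  String.mk (wavy_line_go width text.toList 0)

-- ===== PORT B =====
-- B's chunk walk: emit '  ' followed by the next 4-char chunk of the clamped prefix.
def wavy_line_chunks : List Char → List Char
  | [] => []
  | c :: rest => ' ' :: ' ' :: c :: (rest.take 3 ++ wavy_line_chunks (rest.drop 3))
termination_by l => l.length
decreasing_by simp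

def wavy_line_alt (text : String) (width : Int) : String :=
  String.mk (wavy_line_chunks (text.toList.take (max 0 (width - 4)).toNat))

-- ===== PRECONDITION & SPEC =====
def Spec_wavy_line (text : String) (width : Int) (out : String) : Prop := out = wavy_line_alt text width
instance (text : String) (width : Int) (out : String) : Decidable (Spec_wavy_line text width out) := by unfold Spec_wavy_line; infer_instance

-- ===== CLAIM (what is proved, stated in full; the proofs are below) =====
def Claim_equal_wavy_line : Prop := ∀ (text : String) (width : Int), Dom_wavy_line text width → Spec_wavy_line text width (wavy_line text width)

-- ===== LEMMAS AND PROOFS =====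

-- break-free decoration: what A's loop does to an already-truncated list starting at index i
def wavy_dec : List Char → Nat → List Char
  | [], _ => []
  | c :: rest, i => (if i % 4 == 0 then [' ', ' ', c] else [c]) ++ wavy_dec rest (i + 1)

lemma wavy_go_eq_dec (width : Int) (l : List Char) (i : Nat) :
    wavy_line_go width l i = wavy_dec (l.take (width - 4 - i).toNat) i := by
  induction l generalizing i with
  | nil => simp [wavy_line_go, wavy_dec]
  | cons c rest ih =>
      by_cases h : (i : Int) < width - 4
      · have hk : (width - 4 - i).toNat = (width - 4 - (i + 1)).toNat + 1 := by
          omega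
        simp only [wavy_line_go, if_pos h, hk, List.take_succ_cons, wavy_dec, ih]
        norm_num
      · have hk : (width - 4 - i).toNat = 0 := by omega
        simp [wavy_line_go, if_neg h, hk, wavy_dec]

lemma wavy_chunks_nil : wavy_line_chunks [] = [] := by
  unfold wavy_line_chunks
  rfl

lemma wavy_dec_eq_chunks (s : List Char) (i : Nat) (h : i % 4 = 0) :
    wavy_dec s i = wavy_line_chunks s := by
  match s with
  | [] =>
      unfold wavy_line_chunks
      simp [wavy_dec]
  | [a] =>
      unfold wavy_line_chunks
      simp [wavy_dec, h, wavy_chunks_nil]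
  | [a, b] =>
      have h1 : (i + 1) % 4 = 1 := by omega
      unfold wavy_line_chunks
      simp [wavy_dec, h, h1, wavy_chunks_nil]
  | [a, b, c] =>
      have h1 : (i + 1) % 4 = 1 := by omega
      have h2 : (i + 1 + 1) % 4 = 2 := by omega
      unfold wavy_line_chunks
      simp [wavy_dec, h, h1, h2, wavy_chunks_nil]
  | a :: b :: c :: d :: rest =>
      have h1 : (i + 1) % 4 = 1 := by omega
      have h2 : (i + 1 + 1) % 4 = 2 := by omega
      have h3 : (i + 1 + 1 + 1) % 4 = 3 := by omega
      have h4 : (i + 1 + 1 + 1 + 1) % 4 = 0 := by omega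
      have ih := wavy_dec_eq_chunks rest (i + 1 + 1 + 1 + 1) h4
      unfold wavy_line_chunks
      simp [wavy_dec, h, h1, h2, h3, ih]
termination_by s.length

-- ===== VERDICT (by name: the statement is the Claim_ definition above) =====
theorem wavy_line_spec : Claim_equal_wavy_line := by
  intro text width _
  unfold Spec_wavy_line wavy_line wavy_line_alt
  rw [wavy_go_eq_dec, wavy_dec_eq_chunks _ 0 rfl]
  have : (width - 4 - (0 : Nat)).toNat = (max 0 (width - 4)).toNat := by omega
  rw [this]
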